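-- pv_equiv track=rewrite | github.com/MarcFerrerMargarit/RBM_Grid_Generator | Utils.py | transformInputVector
-- ===== SOURCE A (Python) =====
-- def transformInputVector(vector, maxLength, length):
--     output = []
--     for i in range(length):
--         v = vector[i]
--         for j in range(maxLength):
--             tmp = []
--             length_v = len(v)
--             for k in range(length_v):
--                 if j >= len(v[k]):
--                     tmp.append(0)
--                 else:
--                     tmp.append(v[k][j])
--             output.append(tmp)
--     return output
-- ===== SOURCE B (Python) =====
-- def transformInputVector(vector, maxLength, length):
--     output = []
--     m = max(maxLength, 0)
--     for i in range(length):
--         v = vector[i]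
--         if not v:
--             output.extend([] for _ in range(m))
--         else:
--             padded = [row[:m] + [0] * (m - len(row)) for row in v]
--             output.extend(list(col) for col in zip(*padded))
--     return output
-- ===== Notes on version B (the rewrite author's own statement) =====
-- stated objective: alternative
-- what changed: Per row group, the explicit j/k index double loop with bounds checks is replaced by padding every row to a rectangle of width maxLength and transposing with zip(*), with an explicit empty-group branch.
import Mathlib
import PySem

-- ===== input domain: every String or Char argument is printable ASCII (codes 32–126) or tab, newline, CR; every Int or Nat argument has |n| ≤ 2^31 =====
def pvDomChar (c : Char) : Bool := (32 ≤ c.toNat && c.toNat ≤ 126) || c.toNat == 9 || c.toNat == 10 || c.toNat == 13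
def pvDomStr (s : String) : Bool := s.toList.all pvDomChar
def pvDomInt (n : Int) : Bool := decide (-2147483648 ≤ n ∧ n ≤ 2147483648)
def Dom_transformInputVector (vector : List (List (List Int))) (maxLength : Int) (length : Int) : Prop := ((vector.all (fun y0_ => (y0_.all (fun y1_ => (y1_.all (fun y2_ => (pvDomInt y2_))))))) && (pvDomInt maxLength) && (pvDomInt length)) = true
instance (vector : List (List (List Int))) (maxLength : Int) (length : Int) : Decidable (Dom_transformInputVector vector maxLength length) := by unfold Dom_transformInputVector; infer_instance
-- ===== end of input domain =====

-- B replaces A's three nested index loops by pad-to-rectangle + transpose (zip(*)) per row group;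
-- objective: alternative decomposition of the same cost (mutation: none; return value only).

-- ===== PORT A =====
-- literal transliteration of A: three nested for-loops over ranges, appending to accumulators
def transformInputVector (vector : List (List (List Int))) (maxLength : Int) (length : Int) : List (List Int) :=
  (PySem.List.pyRange 0 length 1).foldl (fun output i =>
    let v := PySem.List.pyGetD vector i []
    (PySem.List.pyRange 0 maxLength 1).foldl (fun output j =>
      let tmp := (PySem.List.pyRange 0 (v.length : Int) 1).foldl (fun tmp k =>
        let row := PySem.List.pyGetD v k []
        if j ≥ (row.length : Int) then tmp ++ [0]
        else tmp ++ [PySem.List.pyGetD row j 0]) []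
      output ++ [tmp]) output) []

-- ===== PORT B =====
-- row[:m] + [0]*(m - len(row))
def pvPadRow (m : Nat) (row : List Int) : List Int :=
  row.take m ++ List.replicate (m - row.length) 0

-- zip(*rows): stop as soon as some row is exhausted; fuel = m, the common padded width
def pvZipStar : Nat → List (List Int) → List (List Int)
  | 0, _ => []
  | n+1, rows =>
    if rows.any (·.isEmpty) then []
    else (rows.map (fun r => r.headI)) :: pvZipStar n (rows.map (·.tail))

def transformInputVector_alt (vector : List (List (List Int))) (maxLength : Int) (length : Int) : List (List Int) :=
  let m := (max maxLength 0).toNat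
  (PySem.List.pyRange 0 length 1).foldl (fun output i =>
    let v := PySem.List.pyGetD vector i []
    if v.isEmpty then output ++ List.replicate m []
    else output ++ pvZipStar m (v.map (pvPadRow m))) []

-- ===== PRECONDITION & SPEC =====
-- Pre_ excludes exactly the inputs where Python A raises IndexError: length > len(vector)
def Pre_transformInputVector (vector : List (List (List Int))) (maxLength : Int) (length : Int) : Prop :=
  length ≤ (vector.length : Int)
instance (vector : List (List (List Int))) (maxLength : Int) (length : Int) : Decidable (Pre_transformInputVector vector maxLength length) := by unfold Pre_transformInputVector; infer_instance

def pvWitness_transformInputVector : List (List (List Int)) × Int × Int := ([[[1, 2], [3]], []], 3, 2)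

def Spec_transformInputVector (vector : List (List (List Int))) (maxLength : Int) (length : Int) (out : List (List Int)) : Prop := out = transformInputVector_alt vector maxLength length
instance (vector : List (List (List Int))) (maxLength : Int) (length : Int) (out : List (List Int)) : Decidable (Spec_transformInputVector vector maxLength length out) := by unfold Spec_transformInputVector; infer_instance

-- ===== CLAIM (what is proved, stated in full; the proofs are below) =====
def Claim_equal_transformInputVector : Prop := ∀ (vector : List (List (List Int))) (maxLength : Int) (length : Int), Dom_transformInputVector vector maxLength length → Pre_transformInputVector vector maxLength length → Spec_transformInputVector vector maxLength length (transformInputVector vector maxLength length)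

-- ===== LEMMAS AND PROOFS =====

theorem pvColA (v : List (List Int)) (j : Int) :
    (PySem.List.pyRange 0 (v.length : Int) 1).foldl (fun tmp k =>
        let row := PySem.List.pyGetD v k []
        if j ≥ (row.length : Int) then tmp ++ [0]
        else tmp ++ [PySem.List.pyGetD row j 0]) []
    = v.map (fun row => if j ≥ (row.length : Int) then 0
                        else PySem.List.pyGetD row j 0) := by
  rw [PySem.List.foldl_pyRange_zero_pyGetD' v []
      (fun tmp row => if j ≥ (row.length : Int) then tmp ++ [0] else tmp ++ [PySem.List.pyGetD row j 0]) []]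
  have : ∀ (w : List (List Int)) (acc : List Int),
      w.foldl (fun tmp row => if j ≥ (row.length : Int) then tmp ++ [0] else tmp ++ [PySem.List.pyGetD row j 0]) acc
      = acc ++ w.map (fun row => if j ≥ (row.length : Int) then 0 else PySem.List.pyGetD row j 0) := by
    intro w
    induction w with
    | nil => simp
    | cons r t ih => intro acc; simp only [List.foldl_cons, List.map_cons]; split_ifs with h <;>
        simp [ih]
  simpa using this v []
theorem pvZipStar_eq (n : Nat) (rows : List (List Int))
    (hlen : ∀ r ∈ rows, n ≤ r.length) :
    pvZipStar n rows = (List.range n).map (fun j => rows.map (fun r => r.getD j 0)) := by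
  induction n generalizing rows with
  | zero => simp [pvZipStar]
  | succ n ih =>
    have hany : rows.any (·.isEmpty) = false := by
      simp only [List.any_eq_false]
      intro r hr
      have := hlen r hr
      cases r with
      | nil => simp at this
      | cons a t => simp
    rw [pvZipStar, if_neg (by simp [hany])]
    rw [ih (rows.map (·.tail)) (by
      intro r hr
      obtain ⟨s, hs, rfl⟩ := List.mem_map.mp hr
      have := hlen s hs
      simp only [List.length_tail]; omega)]
    rw [List.range_succ_eq_map]
    simp only [List.map_cons, List.map_map]
    refine congrArg₂ _ ?_ ?_
    · exact List.map_congr_left fun r _ => by cases r <;> simp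
    · refine List.map_congr_left fun j _ => ?_
      exact List.map_congr_left fun r _ => by cases r <;> simp
theorem pvPadRow_getD (m j : Nat) (hj : j < m) (row : List Int) :
    (pvPadRow m row).getD j 0 = if row.length ≤ j then 0 else row.getD j 0 := by
  unfold pvPadRow
  by_cases h : row.length ≤ j
  · rw [if_pos h]
    have hle : row.length < m := lt_of_le_of_lt h hj
    have h1 : (row.take m).length ≤ j := by rw [List.length_take]; omega
    rw [List.getD_eq_getElem?_getD, List.getElem?_append_right h1, List.length_take]
    have h2 : j - min m row.length < m - row.length := by omega
    rw [List.getElem?_replicate, if_pos h2]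
    simp
  · rw [if_neg h]
    have h' : j < row.length := by omega
    have h1 : j < (row.take m).length := by rw [List.length_take]; omega
    rw [List.getD_eq_getElem?_getD, List.getElem?_append_left h1, List.getElem?_take]
    simp [List.getD_eq_getElem?_getD, hj]
theorem pvGroup (v : List (List Int)) (maxLength : Int) (output : List (List Int)) :
    (PySem.List.pyRange 0 maxLength 1).foldl (fun output j =>
      let tmp := (PySem.List.pyRange 0 (v.length : Int) 1).foldl (fun tmp k =>
        let row := PySem.List.pyGetD v k []
        if j ≥ (row.length : Int) then tmp ++ [0]
        else tmp ++ [PySem.List.pyGetD row j 0]) []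
      output ++ [tmp]) output
    = if v.isEmpty then output ++ List.replicate (max maxLength 0).toNat []
      else output ++ pvZipStar (max maxLength 0).toNat (v.map (pvPadRow (max maxLength 0).toNat)) := by
  have hm : (max maxLength 0).toNat = (maxLength - 0).toNat := by omega
  simp only [funext fun (o : List (List Int)) => funext fun (j : Int) => congrArg (o ++ [·]) (pvColA v j)]
  rw [PySem.List.pyRange_one, List.foldl_map,
      PySem.List.foldl_append_singleton_eq_map, ← hm]
  set m := (max maxLength 0).toNat with hmdef
  cases v with
  | nil => simp
  | cons r t =>
    rw [if_neg (by simp)]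
    rw [pvZipStar_eq m ((r :: t).map (pvPadRow m))
        (by intro s hs; obtain ⟨u, hu, rfl⟩ := List.mem_map.mp hs; simp [pvPadRow]; omega)]
    refine congrArg _ ?_
    refine List.map_congr_left fun j hj => ?_
    have hjm : j < m := List.mem_range.mp hj
    rw [List.map_map]
    refine List.map_congr_left fun s _ => ?_
    simp only [Function.comp, pvPadRow_getD m j hjm s]
    by_cases h : s.length ≤ j
    · rw [if_pos h, if_pos (by omega)]
    · rw [if_neg h, if_neg (by omega)]
      simp [PySem.List.pyGetD_natCast]

-- ===== VERDICT (by name: the statement is the Claim_ definition above) =====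
theorem transformInputVector_spec : Claim_equal_transformInputVector := by
  intro vector maxLength length _ _
  unfold Spec_transformInputVector transformInputVector transformInputVector_alt
  exact congrFun (congrFun (congrArg List.foldl
    (funext fun o => funext fun i => pvGroup (PySem.List.pyGetD vector i []) maxLength o)) []) _
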